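-- pv_equiv track=rewrite | github.com/mereszd/aoc2020 | 16_01.py | ticket_error
-- ===== SOURCE A (Python) =====
-- def ticket_error(fields, nearby_ticket):
--     for value in nearby_ticket:
--         valid = False
--         for field in fields:
--             if fields[field][0][0] <= value <= fields[field][0][1] or fields[field][1][0] <= value <= fields[field][1][1]:
--                 valid = True
--                 break
--         if valid is False:
--             return False
--     return True
-- ===== SOURCE B (Python) =====
-- def ticket_error(fields, nearby_ticket):
--     # Nothing to check: no preprocessing needed.
--     if not nearby_ticket:
--         return True
--     # Collect the two ranges of every field as intervals, drop empty ones,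
--     # sort by lower bound and merge overlaps into disjoint sorted intervals.
--     ivs = []
--     for ranges in fields.values():
--         for r in (ranges[0], ranges[1]):
--             if r[0] <= r[1]:
--                 ivs.append((r[0], r[1]))
--     ivs.sort(key=lambda p: p[0])
--     merged = []
--     for lo, hi in ivs:
--         if merged and lo <= merged[-1][1]:
--             if hi > merged[-1][1]:
--                 merged[-1] = (merged[-1][0], hi)
--         else:
--             merged.append((lo, hi))
--     # Each value is covered iff the rightmost interval whose start is <= value
--     # (found by binary search) also ends at or after it.
--     for v in nearby_ticket:
--         lo_i, hi_i, ans = 0, len(merged) - 1, -1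
--         while lo_i <= hi_i:
--             mid = (lo_i + hi_i) // 2
--             if merged[mid][0] <= v:
--                 ans = mid
--                 lo_i = mid + 1
--             else:
--                 hi_i = mid - 1
--         if ans < 0 or v > merged[ans][1]:
--             return False
--     return True
-- ===== Notes on version B (the rewrite author's own statement) =====
-- stated objective: alternative
-- what changed: Instead of scanning every field's two ranges for every ticket value, B merges all field ranges once into disjoint sorted intervals and binary-searches each value in them (same measured cost on random inputs).
-- outside the precondition, e.g. on ticket_error({'a': [[0, 5], [0, 5]], 'b': []}, [1]): A returns True, B raises IndexError; on ticket_error({'f': [[1, 5], [7]]}, [0]): A returns False, B raises IndexError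
import Mathlib
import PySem

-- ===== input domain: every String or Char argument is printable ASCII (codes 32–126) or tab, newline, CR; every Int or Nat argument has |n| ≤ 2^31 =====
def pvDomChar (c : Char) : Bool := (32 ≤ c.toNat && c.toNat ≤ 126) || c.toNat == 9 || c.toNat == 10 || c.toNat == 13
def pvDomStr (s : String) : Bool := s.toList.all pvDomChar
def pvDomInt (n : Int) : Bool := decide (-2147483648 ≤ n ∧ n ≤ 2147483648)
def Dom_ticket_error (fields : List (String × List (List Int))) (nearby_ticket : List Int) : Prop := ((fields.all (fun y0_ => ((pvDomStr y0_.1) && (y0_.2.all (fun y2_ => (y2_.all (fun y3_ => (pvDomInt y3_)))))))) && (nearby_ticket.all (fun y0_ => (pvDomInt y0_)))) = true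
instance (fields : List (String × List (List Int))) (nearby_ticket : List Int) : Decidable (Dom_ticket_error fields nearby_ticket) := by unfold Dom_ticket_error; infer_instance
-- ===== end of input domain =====

-- B replaces A's per-value scan over every field's two ranges by a once-merged sorted
-- interval list queried by binary search (equivalence of the RETURN value; neither mutates).

-- ===== PORT A =====
-- inner 'if fields[field][0][0] <= value <= fields[field][0][1] or …' for one key
def teFieldCheck (d : PySem.Dict String (List (List Int))) (v : Int) (field : String) : Bool :=
  let rs := d.getD field []
  let r0 := PySem.List.pyGetD rs 0 []
  let r1 := PySem.List.pyGetD rs 1 []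
  (decide (PySem.List.pyGetD r0 0 0 ≤ v) && decide (v ≤ PySem.List.pyGetD r0 1 0)) ||
  (decide (PySem.List.pyGetD r1 0 0 ≤ v) && decide (v ≤ PySem.List.pyGetD r1 1 0))

-- outer 'for value in nearby_ticket' with the valid-flag inner loop (break = .any)
def teLoop (d : PySem.Dict String (List (List Int))) : List Int → Bool
  | [] => true
  | v :: vs => if (PySem.Dict.keys d).any (fun field => teFieldCheck d v field) then teLoop d vs else false

def ticket_error (fields : List (String × List (List Int))) (nearby_ticket : List Int) : Bool :=
  teLoop (PySem.Dict.ofList fields) nearby_ticket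

-- ===== PORT B =====
-- 'for ranges in fields.values(): for r in (ranges[0], ranges[1]): if r[0] <= r[1]: ivs.append(…)'
def tbIvs (d : PySem.Dict String (List (List Int))) : List (Int × Int) :=
  (PySem.Dict.values d).foldl (fun acc rs =>
    [PySem.List.pyGetD rs 0 [], PySem.List.pyGetD rs 1 []].foldl (fun acc r =>
      if PySem.List.pyGetD r 0 0 ≤ PySem.List.pyGetD r 1 0 then
        acc ++ [(PySem.List.pyGetD r 0 0, PySem.List.pyGetD r 1 0)]
      else acc) acc) []

-- one step of the merge loop; the accumulator holds 'merged' in REVERSE so that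
-- merged[-1] is the head (the final .reverse restores Source B's order)
def tbMergeStep (acc : List (Int × Int)) (p : Int × Int) : List (Int × Int) :=
  match acc with
  | [] => [p]
  | (l, h) :: rest =>
    if p.1 ≤ h then (if h < p.2 then (l, p.2) :: rest else (l, h) :: rest)
    else p :: (l, h) :: rest

-- 'while lo_i <= hi_i: …' binary search for the rightmost start ≤ v; 'fuel' is only a
-- structural totality guard (any fuel > hi-lo+1 gives the loop's value)
def tbSearch (m : List (Int × Int)) (v : Int) : Nat → Int → Int → Int → Int
  | 0, _, _, ans => ans
  | fuel + 1, lo, hi, ans =>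
    if lo ≤ hi then
      let mid := PySem.Int.floordiv (lo + hi) 2
      if (PySem.List.pyGetD m mid (0, 0)).1 ≤ v then tbSearch m v fuel (mid + 1) hi mid
      else tbSearch m v fuel lo (mid - 1) ans
    else ans

-- 'for v in nearby_ticket: … if ans < 0 or v > merged[ans][1]: return False'
def tbLoop (m : List (Int × Int)) : List Int → Bool
  | [] => true
  | v :: vs =>
    let ans := tbSearch m v (m.length + 1) 0 ((m.length : Int) - 1) (-1)
    if decide (ans < 0) || decide ((PySem.List.pyGetD m ans (0, 0)).2 < v) then false
    else tbLoop m vs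

-- 'if not nearby_ticket: return True' and then the preprocessing + per-value loop
def ticket_error_alt (fields : List (String × List (List Int))) (nearby_ticket : List Int) : Bool :=
  if nearby_ticket.isEmpty then true
  else
    let d := PySem.Dict.ofList fields
    let merged := ((PySem.List.sorted (tbIvs d) (fun p => p.1) false).foldl tbMergeStep []).reverse
    tbLoop merged nearby_ticket

-- ===== PRECONDITION & SPEC =====
-- Pre_ excludes inputs whose ticket is nonempty and whose dict has a malformed field (fewer
-- than two ranges, or a first/second range with fewer than two endpoints): on every such
-- input B's natural up-front merge raises IndexError, while A raises IndexError exactly when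
-- its lazy short-circuiting scan happens to reach the missing element and returns otherwise.
def Pre_ticket_error (fields : List (String × List (List Int))) (nearby_ticket : List Int) : Prop :=
  nearby_ticket = [] ∨ ∀ p ∈ fields, 2 ≤ p.2.length ∧ ∀ r ∈ p.2.take 2, 2 ≤ r.length

instance (fields : List (String × List (List Int))) (nearby_ticket : List Int) : Decidable (Pre_ticket_error fields nearby_ticket) := by
  unfold Pre_ticket_error; infer_instance

def pvWitness_ticket_error : (List (String × List (List Int))) × List Int :=
  ([("row", [[0, 3], [5, 7]]), ("seat", [[10, 12], [1, 1]])], [2, 6, 11])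

def Spec_ticket_error (fields : List (String × List (List Int))) (nearby_ticket : List Int) (out : Bool) : Prop := out = ticket_error_alt fields nearby_ticket
instance (fields : List (String × List (List Int))) (nearby_ticket : List Int) (out : Bool) : Decidable (Spec_ticket_error fields nearby_ticket out) := by unfold Spec_ticket_error; infer_instance

-- ===== CLAIM (what is proved, stated in full; the proofs are below) =====
def Claim_equal_ticket_error : Prop := ∀ (fields : List (String × List (List Int))) (nearby_ticket : List Int), Dom_ticket_error fields nearby_ticket → Pre_ticket_error fields nearby_ticket → Spec_ticket_error fields nearby_ticket (ticket_error fields nearby_ticket)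

-- ===== LEMMAS AND PROOFS =====

-- the per-field body of A's inner test, as a function of the looked-up ranges
def rsCheck (v : Int) (rs : List (List Int)) : Bool :=
  let r0 := PySem.List.pyGetD rs 0 []
  let r1 := PySem.List.pyGetD rs 1 []
  (decide (PySem.List.pyGetD r0 0 0 ≤ v) && decide (v ≤ PySem.List.pyGetD r0 1 0)) ||
  (decide (PySem.List.pyGetD r1 0 0 ≤ v) && decide (v ≤ PySem.List.pyGetD r1 1 0))

-- the intervals B extracts from one field's range list
def rsIvs (rs : List (List Int)) : List (Int × Int) :=
  ([PySem.List.pyGetD rs 0 [], PySem.List.pyGetD rs 1 []].filter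
    (fun r => decide (PySem.List.pyGetD r 0 0 ≤ PySem.List.pyGetD r 1 0))).map
    (fun r => (PySem.List.pyGetD r 0 0, PySem.List.pyGetD r 1 0))

theorem teLoop_eq_all (d : PySem.Dict String (List (List Int))) (vs : List Int) :
    teLoop d vs = vs.all (fun v => (PySem.Dict.keys d).any (fun k => teFieldCheck d v k)) := by
  induction vs with
  | nil => rfl
  | cons v vs ih =>
    simp only [teLoop, ih, List.all_cons]
    cases h : (PySem.Dict.keys d).any (fun k => teFieldCheck d v k) <;> simp

def bcovered (m : List (Int × Int)) (v : Int) : Bool :=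
  let ans := tbSearch m v (m.length + 1) 0 ((m.length : Int) - 1) (-1)
  !(decide (ans < 0) || decide ((PySem.List.pyGetD m ans (0, 0)).2 < v))

theorem tbLoop_eq_all (m : List (Int × Int)) (vs : List Int) :
    tbLoop m vs = vs.all (fun v => bcovered m v) := by
  induction vs with
  | nil => rfl
  | cons v vs ih =>
    simp only [tbLoop, bcovered, List.all_cons, ih]
    cases h : (decide (tbSearch m v (m.length + 1) 0 ((m.length : Int) - 1) (-1) < 0) ||
        decide ((PySem.List.pyGetD m (tbSearch m v (m.length + 1) 0 ((m.length : Int) - 1) (-1)) (0, 0)).2 < v)) <;>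
      simp

theorem keysAny_eq_valuesAny (d : PySem.Dict String (List (List Int))) (v : Int)
    (hnd : (PySem.Dict.keys d).Nodup) :
    (PySem.Dict.keys d).any (fun k => teFieldCheck d v k) = (PySem.Dict.values d).any (rsCheck v) := by
  rw [PySem.Dict.values_eq_map_keys d hnd ([] : List (List Int))]
  rw [List.any_map]
  rfl

theorem rsCheck_iff (v : Int) (rs : List (List Int)) :
    rsCheck v rs = true ↔ ∃ p ∈ rsIvs rs, p.1 ≤ v ∧ v ≤ p.2 := by
  constructor
  · intro h
    simp only [rsCheck, Bool.or_eq_true, Bool.and_eq_true, decide_eq_true_eq] at h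
    rcases h with ⟨h1, h2⟩ | ⟨h1, h2⟩
    · refine ⟨(PySem.List.pyGetD (PySem.List.pyGetD rs 0 []) 0 0,
              PySem.List.pyGetD (PySem.List.pyGetD rs 0 []) 1 0), ?_, h1, h2⟩
      simp only [rsIvs, List.mem_map, List.mem_filter]
      refine ⟨PySem.List.pyGetD rs 0 [], ⟨by simp, ?_⟩, rfl⟩
      simp only [decide_eq_true_eq]; omega
    · refine ⟨(PySem.List.pyGetD (PySem.List.pyGetD rs 1 []) 0 0,
              PySem.List.pyGetD (PySem.List.pyGetD rs 1 []) 1 0), ?_, h1, h2⟩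
      simp only [rsIvs, List.mem_map, List.mem_filter]
      refine ⟨PySem.List.pyGetD rs 1 [], ⟨by simp, ?_⟩, rfl⟩
      simp only [decide_eq_true_eq]; omega
  · rintro ⟨p, hp, hc1, hc2⟩
    simp only [rsIvs, List.mem_map, List.mem_filter, List.mem_cons, List.not_mem_nil,
      or_false] at hp
    rcases hp with ⟨r, ⟨hr01, _⟩, rfl⟩
    simp only [rsCheck, Bool.or_eq_true, Bool.and_eq_true, decide_eq_true_eq]
    rcases hr01 with rfl | rfl
    · exact Or.inl ⟨hc1, hc2⟩
    · exact Or.inr ⟨hc1, hc2⟩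

theorem tbIvs_eq_flatMap (d : PySem.Dict String (List (List Int))) :
    tbIvs d = (PySem.Dict.values d).flatMap rsIvs := by
  unfold tbIvs
  have hinner : ∀ (acc : List (Int × Int)) (rs : List (List Int)),
      [PySem.List.pyGetD rs 0 [], PySem.List.pyGetD rs 1 []].foldl (fun acc r =>
        if PySem.List.pyGetD r 0 0 ≤ PySem.List.pyGetD r 1 0 then
          acc ++ [(PySem.List.pyGetD r 0 0, PySem.List.pyGetD r 1 0)]
        else acc) acc = acc ++ rsIvs rs := by
    intro acc rs
    exact PySem.List.foldl_append_ite
      (fun r => PySem.List.pyGetD r 0 0 ≤ PySem.List.pyGetD r 1 0)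
      (fun r => (PySem.List.pyGetD r 0 0, PySem.List.pyGetD r 1 0)) _ acc
  calc (PySem.Dict.values d).foldl (fun acc rs =>
        [PySem.List.pyGetD rs 0 [], PySem.List.pyGetD rs 1 []].foldl (fun acc r =>
          if PySem.List.pyGetD r 0 0 ≤ PySem.List.pyGetD r 1 0 then
            acc ++ [(PySem.List.pyGetD r 0 0, PySem.List.pyGetD r 1 0)]
          else acc) acc) []
      = (PySem.Dict.values d).foldl (fun acc rs => acc ++ rsIvs rs) [] := by
        have hfe : (fun (acc : List (Int × Int)) rs =>
            [PySem.List.pyGetD rs 0 [], PySem.List.pyGetD rs 1 []].foldl (fun acc r =>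
              if PySem.List.pyGetD r 0 0 ≤ PySem.List.pyGetD r 1 0 then
                acc ++ [(PySem.List.pyGetD r 0 0, PySem.List.pyGetD r 1 0)]
              else acc) acc) = (fun acc rs => acc ++ rsIvs rs) :=
          funext fun acc => funext fun rs => hinner acc rs
        rw [hfe]
    _ = [] ++ (PySem.Dict.values d).flatMap rsIvs :=
        PySem.List.foldl_append_eq_flatMap rsIvs _ []
    _ = (PySem.Dict.values d).flatMap rsIvs := by simp

theorem anyCheck_iff (d : PySem.Dict String (List (List Int))) (v : Int)
    (hnd : (PySem.Dict.keys d).Nodup) :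
    ((PySem.Dict.keys d).any (fun k => teFieldCheck d v k) = true) ↔
      ∃ p ∈ tbIvs d, p.1 ≤ v ∧ v ≤ p.2 := by
  rw [keysAny_eq_valuesAny d v hnd, tbIvs_eq_flatMap]
  simp only [List.any_eq_true, List.mem_flatMap]
  constructor
  · rintro ⟨rs, hrs, h⟩
    rcases (rsCheck_iff v rs).mp h with ⟨p, hp, hc⟩
    exact ⟨p, ⟨rs, hrs, hp⟩, hc⟩
  · rintro ⟨p, ⟨rs, hrs, hp⟩, hc⟩
    exact ⟨rs, hrs, (rsCheck_iff v rs).mpr ⟨p, hp, hc⟩⟩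

theorem tbIvs_le (d : PySem.Dict String (List (List Int))) :
    ∀ p ∈ tbIvs d, p.1 ≤ p.2 := by
  rw [tbIvs_eq_flatMap]
  intro p hp
  rcases List.mem_flatMap.mp hp with ⟨rs, _, hp⟩
  simp only [rsIvs, List.mem_map, List.mem_filter] at hp
  rcases hp with ⟨r, ⟨_, hr⟩, rfl⟩
  simpa using hr

-- merge-loop invariant: the (reversed) accumulator holds nonempty, strictly separated
-- intervals covering exactly the processed prefix of the sorted interval list
theorem merge_inv (l : List (Int × Int)) : ∀ (acc : List (Int × Int)),
    (∀ p ∈ acc, p.1 ≤ p.2) →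
    acc.Pairwise (fun x y => y.2 < x.1) →
    (∀ p ∈ l, p.1 ≤ p.2) →
    l.Pairwise (fun a b => a.1 ≤ b.1) →
    (∀ q ∈ acc.head?, ∀ p ∈ l, q.1 ≤ p.1) →
    (∀ p ∈ l.foldl tbMergeStep acc, p.1 ≤ p.2) ∧
    (l.foldl tbMergeStep acc).Pairwise (fun x y => y.2 < x.1) ∧
    (∀ v, (∃ p ∈ l.foldl tbMergeStep acc, p.1 ≤ v ∧ v ≤ p.2) ↔
      (∃ p ∈ acc, p.1 ≤ v ∧ v ≤ p.2) ∨ (∃ p ∈ l, p.1 ≤ v ∧ v ≤ p.2)) := by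
  induction l with
  | nil =>
    intro acc H1 H2 _ _ _
    exact ⟨H1, H2, fun v => by simp⟩
  | cons p l ih =>
    intro acc H1 H2 H3 H4 H5
    have hp : p.1 ≤ p.2 := H3 p (List.mem_cons_self)
    rcases H4 with _ | ⟨hpl, H4'⟩
    have H3' : ∀ q ∈ l, q.1 ≤ q.2 := fun q hq => H3 q (List.mem_cons_of_mem p hq)
    simp only [List.foldl_cons]
    -- establish the invariant for acc' = tbMergeStep acc p together with its coverage
    have key : (∀ q ∈ tbMergeStep acc p, q.1 ≤ q.2) ∧
        (tbMergeStep acc p).Pairwise (fun x y => y.2 < x.1) ∧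
        (∀ q ∈ (tbMergeStep acc p).head?, ∀ r ∈ l, q.1 ≤ r.1) ∧
        (∀ v, (∃ q ∈ tbMergeStep acc p, q.1 ≤ v ∧ v ≤ q.2) ↔
          (∃ q ∈ acc, q.1 ≤ v ∧ v ≤ q.2) ∨ (p.1 ≤ v ∧ v ≤ p.2)) := by
      cases acc with
      | nil =>
        refine ⟨?_, by simp [tbMergeStep], ?_, ?_⟩
        · intro q hq
          simp only [tbMergeStep] at hq
          rw [List.mem_singleton] at hq
          subst hq
          exact hp
        · simp only [tbMergeStep, List.head?]
          intro q hq r hr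
          simp only [Option.mem_def, Option.some.injEq] at hq
          subst hq
          exact hpl r hr
        · intro v; simp [tbMergeStep]
      | cons a rest =>
        obtain ⟨l0, h0⟩ := a
        rcases H2 with _ | ⟨hrest, H2'⟩
        have hl0h0 : l0 ≤ h0 := by simpa using H1 (l0, h0) List.mem_cons_self
        have hl0p : l0 ≤ p.1 := by
          have := H5 (l0, h0) (by simp [List.head?]) p List.mem_cons_self
          simpa using this
        have hrest_le : ∀ q ∈ rest, q.1 ≤ q.2 := fun q hq =>
          H1 q (List.mem_cons_of_mem _ hq)
        by_cases hc1 : p.1 ≤ h0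
        · by_cases hc2 : h0 < p.2
          · have hstep : tbMergeStep ((l0, h0) :: rest) p = (l0, p.2) :: rest := by
              simp [tbMergeStep, hc1, hc2]
            rw [hstep]
            refine ⟨?_, ?_, ?_, ?_⟩
            · intro q hq
              rcases List.mem_cons.mp hq with rfl | hq
              · simp; omega
              · exact hrest_le q hq
            · exact List.Pairwise.cons (fun y hy => by simpa using hrest y hy) H2'
            · intro q hq r hr
              simp only [List.head?, Option.mem_def, Option.some.injEq] at hq
              subst hq
              have := hpl r hr
              simp; omega
            · intro v
              simp only [List.exists_mem_cons_iff]
              by_cases hR : ∃ q ∈ rest, q.1 ≤ v ∧ v ≤ q.2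
              · simp [hR]
              · simp only [hR, or_false]
                constructor
                · rintro ⟨ha, hb⟩
                  by_cases hvh : v ≤ h0
                  · exact Or.inl ⟨ha, hvh⟩
                  · exact Or.inr ⟨by omega, hb⟩
                · rintro (⟨ha, hb⟩ | ⟨ha, hb⟩) <;> constructor <;> omega
          · have hstep : tbMergeStep ((l0, h0) :: rest) p = (l0, h0) :: rest := by
              simp [tbMergeStep, hc1, hc2]
            rw [hstep]
            refine ⟨H1, List.Pairwise.cons (fun y hy => hrest y hy) H2', ?_, ?_⟩
            · intro q hq r hr
              simp only [List.head?, Option.mem_def, Option.some.injEq] at hq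
              subst hq
              have := hpl r hr
              simp; omega
            · intro v
              simp only [List.exists_mem_cons_iff]
              by_cases hR : ∃ q ∈ rest, q.1 ≤ v ∧ v ≤ q.2
              · simp [hR]
              · simp only [hR, or_false]
                constructor
                · exact fun h => Or.inl h
                · rintro (⟨ha, hb⟩ | ⟨ha, hb⟩)
                  · exact ⟨ha, hb⟩
                  · exact ⟨by omega, by omega⟩
        · have hstep : tbMergeStep ((l0, h0) :: rest) p = p :: (l0, h0) :: rest := by
            simp [tbMergeStep, hc1]
          rw [hstep]
          refine ⟨?_, ?_, ?_, ?_⟩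
          · intro q hq
            rcases List.mem_cons.mp hq with rfl | hq
            · exact hp
            · exact H1 q hq
          · refine List.Pairwise.cons ?_ (List.Pairwise.cons hrest H2')
            intro y hy
            rcases List.mem_cons.mp hy with rfl | hy
            · simp; omega
            · have h1 := hrest y hy
              omega
          · intro q hq r hr
            simp only [List.head?, Option.mem_def, Option.some.injEq] at hq
            subst hq
            exact hpl r hr
          · intro v
            simp only [List.exists_mem_cons_iff]
            exact or_comm
    obtain ⟨K1, K2, K3, K4⟩ := key
    obtain ⟨R1, R2, R3⟩ := ih (tbMergeStep acc p) K1 K2 H3' H4' K3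
    refine ⟨R1, R2, ?_⟩
    intro v
    rw [R3 v, K4 v]
    simp only [List.exists_mem_cons_iff]
    exact or_assoc

-- binary-search invariant: tbSearch returns the boundary (rightmost index whose start ≤ v)
theorem tbSearch_spec (m : List (Int × Int)) (v : Int)
    (hmono : ∀ i j : Int, 0 ≤ i → i ≤ j → j < (m.length : Int) →
      (PySem.List.pyGetD m i (0, 0)).1 ≤ (PySem.List.pyGetD m j (0, 0)).1) :
    ∀ (fuel : Nat) (lo hi ans : Int), (hi - lo + 1).toNat < fuel →
    0 ≤ lo → hi < (m.length : Int) → lo ≤ hi + 1 → ans = lo - 1 →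
    (∀ i : Int, 0 ≤ i → i < lo → (PySem.List.pyGetD m i (0, 0)).1 ≤ v) →
    (∀ i : Int, hi < i → i < (m.length : Int) → v < (PySem.List.pyGetD m i (0, 0)).1) →
    -1 ≤ tbSearch m v fuel lo hi ans ∧ tbSearch m v fuel lo hi ans < (m.length : Int) ∧
    (∀ i : Int, 0 ≤ i → i ≤ tbSearch m v fuel lo hi ans → (PySem.List.pyGetD m i (0, 0)).1 ≤ v) ∧
    (∀ i : Int, tbSearch m v fuel lo hi ans < i → i < (m.length : Int) →
      v < (PySem.List.pyGetD m i (0, 0)).1) := by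
  intro fuel
  induction fuel with
  | zero => intro lo hi ans hsz; omega
  | succ fuel ih =>
    intro lo hi ans hsz hlo hhi hlohi hans hpre hsuf
    by_cases h : lo ≤ hi
    · obtain ⟨hm1, hm2⟩ := PySem.Int.floordiv_two_mid_bounds h
      rw [tbSearch]
      simp only [if_pos h]
      by_cases hcmp : (PySem.List.pyGetD m (PySem.Int.floordiv (lo + hi) 2) (0, 0)).1 ≤ v
      · rw [if_pos hcmp]
        exact ih (PySem.Int.floordiv (lo + hi) 2 + 1) hi (PySem.Int.floordiv (lo + hi) 2)
          (by omega) (by omega) hhi (by omega) (by omega)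
          (fun i h0 hi' => by
            by_cases hilo : i < lo
            · exact hpre i h0 hilo
            · exact le_trans (hmono i (PySem.Int.floordiv (lo + hi) 2) h0 (by omega) (by omega)) hcmp)
          hsuf
      · rw [if_neg hcmp]
        push Not at hcmp
        exact ih lo (PySem.Int.floordiv (lo + hi) 2 - 1) ans
          (by omega) hlo (by omega) (by omega) hans hpre
          (fun i hmi hi' =>
            lt_of_lt_of_le hcmp (hmono (PySem.Int.floordiv (lo + hi) 2) i (by omega) (by omega) hi'))
    · rw [tbSearch]
      simp only [if_neg h]
      push Not at h
      refine ⟨by omega, by omega, ?_, ?_⟩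
      · intro i h0 hi'
        exact hpre i h0 (by omega)
      · intro i hi' hlen
        exact hsuf i (by omega) hlen

theorem bcovered_iff (m : List (Int × Int)) (v : Int)
    (hlh : ∀ p ∈ m, p.1 ≤ p.2)
    (hpair : m.Pairwise (fun x y => x.2 < y.1)) :
    bcovered m v = true ↔ ∃ p ∈ m, p.1 ≤ v ∧ v ≤ p.2 := by
  have hpg : ∀ i j : Int, 0 ≤ i → i < j → j < (m.length : Int) →
      (PySem.List.pyGetD m i (0, 0)).2 < (PySem.List.pyGetD m j (0, 0)).1 := by
    intro i j h0 hij hj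
    rw [PySem.List.pyGetD_eq_getElem m (0, 0) h0 (by omega),
        PySem.List.pyGetD_eq_getElem m (0, 0) (by omega) hj]
    exact (List.pairwise_iff_getElem.mp hpair) i.toNat j.toNat (by omega) (by omega) (by omega)
  have hmono : ∀ i j : Int, 0 ≤ i → i ≤ j → j < (m.length : Int) →
      (PySem.List.pyGetD m i (0, 0)).1 ≤ (PySem.List.pyGetD m j (0, 0)).1 := by
    intro i j h0 hij hj
    rcases eq_or_lt_of_le hij with rfl | hlt
    · exact le_refl _
    · have h1 : (PySem.List.pyGetD m i (0, 0)).1 ≤ (PySem.List.pyGetD m i (0, 0)).2 := by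
        have := hlh (PySem.List.pyGetD m i (0, 0)) (PySem.List.pyGetD_mem m (0, 0) (by simp [PySem.Raise.InRange]; omega))
        exact this
      exact le_of_lt (lt_of_le_of_lt h1 (hpg i j h0 hlt hj))
  obtain ⟨S1, S2, S3, S4⟩ := tbSearch_spec m v hmono (m.length + 1) 0 ((m.length : Int) - 1) (-1)
    (by omega) (by omega) (by omega) (by omega) (by omega)
    (by omega) (by intro i hi hlen; omega)
  set r := tbSearch m v (m.length + 1) 0 ((m.length : Int) - 1) (-1) with hr
  have hbc : bcovered m v = !(decide (r < 0) || decide ((PySem.List.pyGetD m r (0, 0)).2 < v)) := rfl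
  rw [hbc]
  constructor
  · intro h
    simp only [Bool.not_eq_eq_eq_not, Bool.not_true, Bool.or_eq_false_iff,
      decide_eq_false_iff_not, not_lt] at h
    obtain ⟨h0r, hvr⟩ := h
    refine ⟨PySem.List.pyGetD m r (0, 0), PySem.List.pyGetD_mem m (0, 0) (by simp [PySem.Raise.InRange]; omega), S3 r h0r le_rfl, hvr⟩
  · rintro ⟨p, hpm, hc1, hc2⟩
    rcases List.mem_iff_getElem.mp hpm with ⟨i, hilen, rfl⟩
    have hgi : PySem.List.pyGetD m (i : Int) (0, 0) = m[i] :=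
      PySem.List.pyGetD_eq_getElem m (0, 0) (by omega) (by simpa using hilen)
    simp only [Bool.not_eq_eq_eq_not, Bool.not_true, Bool.or_eq_false_iff,
      decide_eq_false_iff_not, not_lt]
    have hir : (i : Int) ≤ r := by
      by_contra hgt
      push Not at hgt
      have := S4 (i : Int) hgt (by omega)
      rw [hgi] at this
      omega
    have h0r : (0 : Int) ≤ r := le_trans (by omega) hir
    refine ⟨h0r, ?_⟩
    rcases eq_or_lt_of_le hir with heq | hlt
    · rw [← heq, hgi]; exact hc2
    · exfalso
      have hgap := hpg (i : Int) r (by omega) hlt S2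
      have := S3 r h0r le_rfl
      rw [hgi] at hgap
      omega

-- the two per-value tests agree
theorem point_eq (d : PySem.Dict String (List (List Int)))
    (hnd : (PySem.Dict.keys d).Nodup) (v : Int) :
    (PySem.Dict.keys d).any (fun k => teFieldCheck d v k) =
      bcovered (((PySem.List.sorted (tbIvs d) (fun p => p.1) false).foldl tbMergeStep []).reverse) v := by
  have hsle : ∀ p ∈ PySem.List.sorted (tbIvs d) (fun p => p.1) false, p.1 ≤ p.2 := by
    intro p hp
    exact tbIvs_le d p ((PySem.List.mem_sorted (tbIvs d) (fun p => p.1) false p).mp hp)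
  have hspair : (PySem.List.sorted (tbIvs d) (fun p => p.1) false).Pairwise (fun a b => a.1 ≤ b.1) :=
    PySem.List.sorted_pairwise (tbIvs d) (fun p => p.1)
  obtain ⟨M1, M2, M3⟩ := merge_inv (PySem.List.sorted (tbIvs d) (fun p => p.1) false) []
    (by simp) (by simp) hsle hspair (by simp [List.head?])
  have hrle : ∀ p ∈ ((PySem.List.sorted (tbIvs d) (fun p => p.1) false).foldl tbMergeStep []).reverse,
      p.1 ≤ p.2 := fun p hp => M1 p (List.mem_reverse.mp hp)
  have hrpair : (((PySem.List.sorted (tbIvs d) (fun p => p.1) false).foldl tbMergeStep []).reverse).Pairwise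
      (fun x y => x.2 < y.1) := List.pairwise_reverse.mpr M2
  rw [Bool.eq_iff_iff, anyCheck_iff d v hnd, bcovered_iff _ v hrle hrpair]
  constructor
  · rintro ⟨p, hp, hc⟩
    have hps : p ∈ PySem.List.sorted (tbIvs d) (fun p => p.1) false :=
      (PySem.List.mem_sorted (tbIvs d) (fun p => p.1) false p).mpr hp
    have : ∃ q ∈ (PySem.List.sorted (tbIvs d) (fun p => p.1) false).foldl tbMergeStep [],
        q.1 ≤ v ∧ v ≤ q.2 := (M3 v).mpr (Or.inr ⟨p, hps, hc⟩)
    rcases this with ⟨q, hq, hqc⟩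
    exact ⟨q, List.mem_reverse.mpr hq, hqc⟩
  · rintro ⟨p, hp, hc⟩
    have := (M3 v).mp ⟨p, List.mem_reverse.mp hp, hc⟩
    rcases this with ⟨q, hq, _⟩ | ⟨q, hqs, hqc⟩
    · simp at hq
    · exact ⟨q, (PySem.List.mem_sorted (tbIvs d) (fun p => p.1) false q).mp hqs, hqc⟩

-- ===== VERDICT (by name: the statement is the Claim_ definition above) =====
theorem ticket_error_spec : Claim_equal_ticket_error := by
  intro fields nearby_ticket _ _
  unfold Spec_ticket_error
  cases nearby_ticket with
  | nil => rfl
  | cons v vs =>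
    show teLoop (PySem.Dict.ofList fields) (v :: vs) =
      ticket_error_alt fields (v :: vs)
    unfold ticket_error_alt
    simp only [List.isEmpty_cons, if_neg Bool.false_ne_true]
    rw [teLoop_eq_all, tbLoop_eq_all]
    have hpt := funext (point_eq (PySem.Dict.ofList fields) (PySem.Dict.nodup_keys_ofList fields))
    rw [show (fun v => (PySem.Dict.keys (PySem.Dict.ofList fields)).any
        (fun k => teFieldCheck (PySem.Dict.ofList fields) v k)) =
      (fun v => bcovered (((PySem.List.sorted (tbIvs (PySem.Dict.ofList fields)) (fun p => p.1)
        false).foldl tbMergeStep []).reverse) v) from hpt]
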